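-- pv_equiv track=rewrite | github.com/JaviMaligno/AoC | AoC2023/Day21/C21.py | reachable_tiles
-- ===== SOURCE A (Python) =====
-- def reachable_tiles(grid, x, y, max_steps):
--     reachable = [set() for _ in range(max_steps + 1)]
--     reachable[0].add((x, y, 0, 0))  # Include offsets in state
--     for steps in range(max_steps):
--         for x, y, dx, dy in reachable[steps]:
--             for ddx, ddy in [(0, 1), (1, 0), (0, -1), (-1, 0)]:
--                 nx, ny = (x + ddx) % len(grid), (y + ddy) % len(grid[0])
--                 ndx, ndy = dx + (ddx if nx == 0 else 0), dy + (ddy if ny == 0 else 0)  # Update offsets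
--                 if grid[nx][ny] != '#':
--                     reachable[steps + 1].add((nx, ny, ndx, ndy))
--     return len(reachable[max_steps])
-- ===== SOURCE B (Python) =====
-- def reachable_tiles(grid, x, y, max_steps):
--     if max_steps <= 0:
--         return 1
--     n, m = len(grid), len(grid[0])
--     moves = ((0, 1), (1, 0), (0, -1), (-1, 0))
--     # step 1 from the raw start, grouped per cell: offs[i][j] = set of wrap offsets at cell (i,j)
--     offs = [[{(ddx if i == 0 else 0, ddy if j == 0 else 0)
--               for ddx, ddy in moves
--               if ((x + ddx) % n, (y + ddy) % m) == (i, j) and grid[i][j] != '#'}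
--              for j in range(m)] for i in range(n)]
--     # incoming edge tables (predecessor cell = target minus move, wrapped; the wrap offset
--     # of a move depends only on the landing cell): inc1 = one step, inc2 = composed two steps
--     inc1 = [[[] if grid[i][j] == '#' else
--              [((i - ddx) % n, (j - ddy) % m,
--                ddx if i == 0 else 0, ddy if j == 0 else 0)
--               for ddx, ddy in moves]
--              for j in range(m)] for i in range(n)]
--     inc2 = [[[] if grid[i][j] == '#' else
--              [((a - d1x) % n, (b - d1y) % m,
--                (d1x if a == 0 else 0) + (d2x if i == 0 else 0),
--                (d1y if b == 0 else 0) + (d2y if j == 0 else 0))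
--               for d2x, d2y in moves
--               for (a, b) in [((i - d2x) % n, (j - d2y) % m)]
--               if grid[a][b] != '#'
--               for d1x, d1y in moves]
--              for j in range(m)] for i in range(n)]
--     # advance two steps per iteration (one single step if the remainder is odd),
--     # translating whole offset sets along the incoming edges
--     t = max_steps - 1
--     for table in [inc2] * (t // 2) + [inc1] * (t % 2):
--         offs = [[{(dx + ox, dy + oy)
--                   for (si, sj, ox, oy) in table[i][j]
--                   for (dx, dy) in offs[si][sj]}
--                  for j in range(m)] for i in range(n)]
--     return sum(len(s) for row in offs for s in row)
-- ===== Notes on version B (the rewrite author's own statement) =====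
-- stated objective: alternative
-- what changed: B abandons A's list of per-step sets of (x,y,dx,dy) states: it keeps one per-cell grid of wrap-offset sets, precomputes per-cell INCOMING edge tables for the composed two-step relation (and the one-step relation for an odd remainder), and advances two steps per iteration by translating whole offset sets, returning a sum of set sizes; the grid, mod arithmetic and 4-tuple states disappear from the main loop.
-- outside the precondition, e.g. on reachable_tiles(['.#', '#'], 0, 0, 1): A returns 0, B raises IndexError
import Mathlib
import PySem

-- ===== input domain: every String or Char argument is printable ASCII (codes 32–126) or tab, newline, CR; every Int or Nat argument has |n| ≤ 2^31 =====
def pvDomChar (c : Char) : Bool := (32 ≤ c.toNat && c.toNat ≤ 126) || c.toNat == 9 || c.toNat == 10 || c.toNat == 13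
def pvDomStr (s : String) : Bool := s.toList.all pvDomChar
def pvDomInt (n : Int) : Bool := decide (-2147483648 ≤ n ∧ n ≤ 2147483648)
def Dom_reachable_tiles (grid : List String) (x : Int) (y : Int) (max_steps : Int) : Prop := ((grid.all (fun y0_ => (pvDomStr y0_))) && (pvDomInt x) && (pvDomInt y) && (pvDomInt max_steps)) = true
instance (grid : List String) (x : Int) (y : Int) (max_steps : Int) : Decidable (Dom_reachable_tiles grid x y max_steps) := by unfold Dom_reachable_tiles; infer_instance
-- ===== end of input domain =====

-- B replaces A's per-step sets of 4-tuple states by a per-cell grid of wrap-offset sets,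
-- advanced two steps per iteration along precomputed incoming-edge tables of the composed
-- two-step relation (objective: alternative).


-- state: (x, y, dx, dy)
abbrev PvSt := Int × Int × Int × Int

-- the 4 moves, in A's (and B's) literal order
def pvMoves : List (Int × Int) := [(0, 1), (1, 0), (0, -1), (-1, 0)]

-- ===== PORT A =====
-- A's inner loop body: the 4 conditional adds generated by one frontier state
def pvAinner (grid : List String) (acc : PySem.Set PvSt) (st : PvSt) : PySem.Set PvSt :=
  pvMoves.foldl (fun acc dd =>
    let nx := PySem.Int.mod (st.1 + dd.1) grid.length
    let ny := PySem.Int.mod (st.2.1 + dd.2) (PySem.Str.len (PySem.List.pyGetD grid 0 ""))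
    let ndx := st.2.2.1 + (if nx == 0 then dd.1 else 0)
    let ndy := st.2.2.2 + (if ny == 0 then dd.2 else 0)
    if PySem.Str.pyGet? (PySem.List.pyGetD grid nx "") ny != some '#'
    then PySem.Set.add acc (nx, ny, ndx, ndy) else acc) acc
def reachable_tiles (grid : List String) (x : Int) (y : Int) (max_steps : Int) : Int :=
  if max_steps < 0 then 0
  else
    let layers : List (PySem.Set PvSt) :=
      PySem.Set.add PySem.Set.empty (x, y, 0, 0) :: List.replicate max_steps.toNat PySem.Set.empty
    let layers := (PySem.List.pyRange 0 max_steps 1).foldl (fun layers steps =>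
      let cur := PySem.List.pyGetD layers steps PySem.Set.empty
      let nxt := cur.foldl (pvAinner grid) (PySem.List.pyGetD layers (steps + 1) PySem.Set.empty)
      layers.set (steps + 1).toNat nxt) layers
    (PySem.List.pyGetD layers max_steps PySem.Set.empty).length

-- ===== PORT B =====
-- offsets of the first step that land at cell (i, j)  ({…} comprehension of Source B)
def pvB0 (grid : List String) (n m x y i j : Int) : PySem.Set (Int × Int) :=
  PySem.Set.ofList ((pvMoves.filter (fun dd =>
      (PySem.Int.mod (x + dd.1) n, PySem.Int.mod (y + dd.2) m) == (i, j) &&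
      PySem.Str.pyGet? (PySem.List.pyGetD grid i "") j != some '#')).map (fun dd =>
    ((if i == (0 : Int) then dd.1 else 0), (if j == (0 : Int) then dd.2 else 0))))
-- incoming one-step edges of cell (i, j): (source i, source j, offset dx, offset dy)
def pvInc1 (grid : List String) (n m i j : Int) : List PvSt :=
  if PySem.Str.pyGet? (PySem.List.pyGetD grid i "") j == some '#' then []
  else pvMoves.map (fun dd =>
    (PySem.Int.mod (i - dd.1) n, PySem.Int.mod (j - dd.2) m,
     (if i == (0 : Int) then dd.1 else 0), (if j == (0 : Int) then dd.2 else 0)))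
-- incoming composed two-step edges of cell (i, j)
def pvInc2 (grid : List String) (n m i j : Int) : List PvSt :=
  if PySem.Str.pyGet? (PySem.List.pyGetD grid i "") j == some '#' then []
  else (pvMoves.filter (fun d2 =>
      PySem.Str.pyGet? (PySem.List.pyGetD grid (PySem.Int.mod (i - d2.1) n) "")
        (PySem.Int.mod (j - d2.2) m) != some '#')).flatMap (fun d2 =>
    let a := PySem.Int.mod (i - d2.1) n
    let b := PySem.Int.mod (j - d2.2) m
    pvMoves.map (fun d1 =>
      (PySem.Int.mod (a - d1.1) n, PySem.Int.mod (b - d1.2) m,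
       (if a == (0 : Int) then d1.1 else 0) + (if i == (0 : Int) then d2.1 else 0),
       (if b == (0 : Int) then d1.2 else 0) + (if j == (0 : Int) then d2.2 else 0))))
-- one bulk update of the per-cell offset grid along an incoming-edge table
def pvBstep (n m : Int) (offs : List (List (PySem.Set (Int × Int))))
    (table : List (List (List PvSt))) : List (List (PySem.Set (Int × Int))) :=
  (PySem.List.pyRange 0 n 1).map (fun i => (PySem.List.pyRange 0 m 1).map (fun j =>
    PySem.Set.ofList ((PySem.List.pyGetD (PySem.List.pyGetD table i []) j []).flatMap (fun e =>
      (PySem.List.pyGetD (PySem.List.pyGetD offs e.1 []) e.2.1 []).map (fun o =>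
        (e.2.2.1 + o.1, e.2.2.2 + o.2))))))
def reachable_tiles_alt (grid : List String) (x : Int) (y : Int) (max_steps : Int) : Int :=
  if max_steps ≤ 0 then 1
  else
    let n : Int := grid.length
    let m : Int := PySem.Str.len (PySem.List.pyGetD grid 0 "")
    let offs : List (List (PySem.Set (Int × Int))) :=
      (PySem.List.pyRange 0 n 1).map (fun i => (PySem.List.pyRange 0 m 1).map (fun j =>
        pvB0 grid n m x y i j))
    let inc1 := (PySem.List.pyRange 0 n 1).map (fun i =>
      (PySem.List.pyRange 0 m 1).map (fun j => pvInc1 grid n m i j))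
    let inc2 := (PySem.List.pyRange 0 n 1).map (fun i =>
      (PySem.List.pyRange 0 m 1).map (fun j => pvInc2 grid n m i j))
    let t := max_steps - 1
    let offs := (List.replicate (PySem.Int.floordiv t 2).toNat inc2 ++
        List.replicate (PySem.Int.mod t 2).toNat inc1).foldl (pvBstep n m) offs
    (offs.flatMap (fun row => row.map PySem.Set.len)).sum

-- ===== PRECONDITION & SPEC =====
-- Pre_ excludes max_steps < 0 (A raises IndexError) and, for max_steps > 0, empty / zero-width
-- grids (A raises ZeroDivisionError or IndexError) as well as grids with a row shorter than
-- row 0: there A sometimes still returns (when walls keep the walk away from the missing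
-- cells) but B's natural table precomputation probes every cell and raises IndexError.
def Pre_reachable_tiles (grid : List String) (x : Int) (y : Int) (max_steps : Int) : Prop :=
  0 ≤ max_steps ∧ (max_steps = 0 ∨
    (grid ≠ [] ∧ 0 < PySem.Str.len (grid.headD "") ∧
      ∀ r ∈ grid, PySem.Str.len (grid.headD "") ≤ PySem.Str.len r))
instance (grid : List String) (x : Int) (y : Int) (max_steps : Int) : Decidable (Pre_reachable_tiles grid x y max_steps) := by unfold Pre_reachable_tiles; infer_instance

def pvWitness_reachable_tiles : List String × Int × Int × Int := (["..", ".#"], 0, 0, 2)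

def Spec_reachable_tiles (grid : List String) (x : Int) (y : Int) (max_steps : Int) (out : Int) : Prop := out = reachable_tiles_alt grid x y max_steps
instance (grid : List String) (x : Int) (y : Int) (max_steps : Int) (out : Int) : Decidable (Spec_reachable_tiles grid x y max_steps out) := by unfold Spec_reachable_tiles; infer_instance

-- ===== CLAIM (what is proved, stated in full; the proofs are below) =====
def Claim_equal_reachable_tiles : Prop := ∀ (grid : List String) (x : Int) (y : Int) (max_steps : Int), Dom_reachable_tiles grid x y max_steps → Pre_reachable_tiles grid x y max_steps → Spec_reachable_tiles grid x y max_steps (reachable_tiles grid x y max_steps)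

-- ===== LEMMAS AND PROOFS =====

-- A's one step as a function of the previous layer alone
def pvF (grid : List String) (s : PySem.Set PvSt) : PySem.Set PvSt :=
  s.foldl (pvAinner grid) PySem.Set.empty

theorem pvA_fold_inv (grid : List String) (init : PySem.Set PvSt) (N : Nat) (k : Nat) (hk : k ≤ N) :
    (List.range k).foldl
      (fun layers (steps : Nat) =>
        layers.set (((steps : Int)) + 1).toNat
          ((PySem.List.pyGetD layers (steps : Int) PySem.Set.empty).foldl (pvAinner grid)
            (PySem.List.pyGetD layers ((steps : Int) + 1) PySem.Set.empty)))
      (init :: List.replicate N PySem.Set.empty)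
    = (List.range (k + 1)).map (fun i => (pvF grid)^[i] init)
        ++ List.replicate (N - k) PySem.Set.empty := by
  induction k with
  | zero => simp
  | succ k ih =>
    have hk' : k ≤ N := Nat.le_of_succ_le hk
    rw [List.range_succ, List.foldl_append, ih hk']
    simp only [List.foldl_cons, List.foldl_nil]
    set L1 := (List.range (k + 1)).map (fun i => (pvF grid)^[i] init) with hL1
    have hlen1 : L1.length = k + 1 := by simp [hL1]
    have hNk : N - k = (N - k - 1) + 1 := by omega
    have hget_k : PySem.List.pyGetD (L1 ++ List.replicate (N - k) PySem.Set.empty) (k : Int)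
        PySem.Set.empty = (pvF grid)^[k] init := by
      rw [PySem.List.pyGetD_natCast, List.getD_eq_getElem _ _ (by simp [hlen1]; omega)]
      rw [List.getElem_append_left (by omega)]
      simp only [hL1, List.getElem_map, List.getElem_range]
    have hget_k1 : PySem.List.pyGetD (L1 ++ List.replicate (N - k) PySem.Set.empty)
        ((k : Int) + 1) PySem.Set.empty = PySem.Set.empty := by
      have h1 : ((k : Int) + 1) = ((k + 1 : Nat) : Int) := by push_cast; ring
      rw [h1, PySem.List.pyGetD_natCast, List.getD_eq_getElem _ _ (by simp [hlen1]; omega)]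
      rw [List.getElem_append_right (by omega)]
      simp
    rw [hget_k, hget_k1]
    have htn : ((k : Int) + 1).toNat = k + 1 := by omega
    rw [htn, List.set_append, if_neg (by omega)]
    have h0 : k + 1 - L1.length = 0 := by omega
    rw [h0, hNk, List.replicate_succ, List.set_cons_zero]
    rw [List.range_succ, List.map_append]
    simp only [List.map_cons, List.map_nil, List.append_assoc, List.cons_append, List.nil_append]
    rw [Function.iterate_succ_apply']
    rfl

theorem reachable_tiles_A_iter (grid : List String) (x y max_steps : Int)
    (h : 0 ≤ max_steps) :
    reachable_tiles grid x y max_steps =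
      (((pvF grid)^[max_steps.toNat] (PySem.Set.add PySem.Set.empty (x, y, 0, 0))).length : Int) := by
  unfold reachable_tiles
  rw [if_neg (by omega)]
  dsimp only
  rw [PySem.List.pyRange_zero, List.foldl_map]
  rw [pvA_fold_inv grid _ max_steps.toNat max_steps.toNat le_rfl]
  simp only [Nat.sub_self, List.replicate_zero, List.append_nil]
  have hms : max_steps = ((max_steps.toNat : Nat) : Int) := by omega
  rw [hms, PySem.List.pyGetD_natCast]
  rw [List.getD_eq_getElem _ _ (by simp)]
  simp only [List.getElem_map, List.getElem_range]
  congr 2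

-- in-range bound on the cell coordinates of a state
def pvInb (grid : List String) (z : PvSt) : Prop :=
  0 ≤ z.1 ∧ z.1 < (grid.length : Int) ∧ 0 ≤ z.2.1 ∧
    z.2.1 < PySem.Str.len (PySem.List.pyGetD grid 0 "")

-- A's transition, named: next state and passability of its cell
def pvNext (grid : List String) (st : PvSt) (dd : Int × Int) : PvSt :=
  (PySem.Int.mod (st.1 + dd.1) grid.length,
   PySem.Int.mod (st.2.1 + dd.2) (PySem.Str.len (PySem.List.pyGetD grid 0 "")),
   st.2.2.1 + (if PySem.Int.mod (st.1 + dd.1) grid.length == (0 : Int) then dd.1 else 0),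
   st.2.2.2 + (if PySem.Int.mod (st.2.1 + dd.2) (PySem.Str.len (PySem.List.pyGetD grid 0 "")) == (0 : Int) then dd.2 else 0))
def pvOK (grid : List String) (st : PvSt) (dd : Int × Int) : Bool :=
  PySem.Str.pyGet? (PySem.List.pyGetD grid (PySem.Int.mod (st.1 + dd.1) grid.length) "")
      (PySem.Int.mod (st.2.1 + dd.2) (PySem.Str.len (PySem.List.pyGetD grid 0 ""))) != some '#'

-- membership in a fold of conditional adds
theorem pv_mem_foldl_ifadd {α β : Type} [BEq α] [LawfulBEq α] (l : List β) (c : β → Bool)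
    (g : β → α) (s : PySem.Set α) (z : α) :
    z ∈ l.foldl (fun acc dd => if c dd then PySem.Set.add acc (g dd) else acc) s ↔
      z ∈ s ∨ ∃ dd ∈ l, c dd = true ∧ z = g dd := by
  induction l generalizing s with
  | nil => simp
  | cons a l ih =>
    simp only [List.foldl_cons]
    rw [ih]
    by_cases h : c a = true
    · simp [h, PySem.Set.mem_add]
      tauto
    · simp [h]

theorem pv_nodup_foldl_ifadd {α β : Type} [BEq α] [LawfulBEq α] (l : List β) (c : β → Bool)
    (g : β → α) (s : PySem.Set α) (hs : s.Nodup) :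
    (l.foldl (fun acc dd => if c dd then PySem.Set.add acc (g dd) else acc) s).Nodup := by
  induction l generalizing s with
  | nil => exact hs
  | cons a l ih =>
    simp only [List.foldl_cons]
    apply ih
    split
    · exact PySem.Set.nodup_add _ _ hs
    · exact hs

theorem pvAinner_eq (grid : List String) (acc : PySem.Set PvSt) (st : PvSt) :
    pvAinner grid acc st =
      pvMoves.foldl (fun acc dd =>
        if pvOK grid st dd then PySem.Set.add acc (pvNext grid st dd) else acc) acc := rfl

theorem pv_mem_pvAinner (grid : List String) (acc : PySem.Set PvSt) (st z : PvSt) :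
    z ∈ pvAinner grid acc st ↔
      z ∈ acc ∨ ∃ dd ∈ pvMoves, pvOK grid st dd = true ∧ z = pvNext grid st dd := by
  rw [pvAinner_eq]
  exact pv_mem_foldl_ifadd _ _ _ _ _

theorem pv_mem_foldl_pvAinner (grid : List String) (l : List PvSt) (acc : PySem.Set PvSt)
    (z : PvSt) :
    z ∈ l.foldl (pvAinner grid) acc ↔
      z ∈ acc ∨ ∃ st ∈ l, ∃ dd ∈ pvMoves, pvOK grid st dd = true ∧ z = pvNext grid st dd := by
  induction l generalizing acc with
  | nil => simp
  | cons a l ih =>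
    simp only [List.foldl_cons]
    rw [ih, pv_mem_pvAinner]
    simp only [List.mem_cons]
    constructor
    · rintro ((h | ⟨dd, hdd, hok, hz⟩) | ⟨st, hst, hrest⟩)
      · exact Or.inl h
      · exact Or.inr ⟨a, Or.inl rfl, dd, hdd, hok, hz⟩
      · exact Or.inr ⟨st, Or.inr hst, hrest⟩
    · rintro (h | ⟨st, (rfl | hst), hrest⟩)
      · exact Or.inl (Or.inl h)
      · exact Or.inl (Or.inr hrest)
      · exact Or.inr ⟨st, hst, hrest⟩

theorem pv_mem_pvF (grid : List String) (F : PySem.Set PvSt) (z : PvSt) :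
    z ∈ pvF grid F ↔
      ∃ st ∈ F, ∃ dd ∈ pvMoves, pvOK grid st dd = true ∧ z = pvNext grid st dd := by
  unfold pvF
  rw [pv_mem_foldl_pvAinner]
  simp [PySem.Set.empty]

theorem pv_nodup_pvAinner (grid : List String) (acc : PySem.Set PvSt) (st : PvSt)
    (h : acc.Nodup) : (pvAinner grid acc st).Nodup := by
  rw [pvAinner_eq]; exact pv_nodup_foldl_ifadd _ _ _ _ h

theorem pv_nodup_pvF (grid : List String) (F : PySem.Set PvSt) : (pvF grid F).Nodup := by
  unfold pvF
  have : ∀ (l : List PvSt) (acc : PySem.Set PvSt), acc.Nodup →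
      (l.foldl (pvAinner grid) acc).Nodup := by
    intro l
    induction l with
    | nil => intro acc h; exact h
    | cons a l ih => intro acc h; exact ih _ (pv_nodup_pvAinner _ _ _ h)
  exact this F PySem.Set.empty (by simp [PySem.Set.empty])

theorem pv_bounds_pvF (grid : List String) (s : PySem.Set PvSt) (z : PvSt)
    (hn : 0 < (grid.length : Int)) (hm : 0 < PySem.Str.len (PySem.List.pyGetD grid 0 ""))
    (hz : z ∈ pvF grid s) : pvInb grid z := by
  rw [pv_mem_pvF] at hz
  obtain ⟨st, _, dd, _, _, rfl⟩ := hz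
  exact ⟨PySem.Int.mod_nonneg _ hn, PySem.Int.mod_lt _ hn,
    PySem.Int.mod_nonneg _ hm, PySem.Int.mod_lt _ hm⟩

-- mod arithmetic: cancellation of a wrapped step
theorem pvmod_idem_add (u d n : Int) (h : 0 < n) :
    PySem.Int.mod (PySem.Int.mod u n + d) n = PySem.Int.mod (u + d) n := by
  rw [PySem.Int.mod_eq_emod_of_pos h, PySem.Int.mod_eq_emod_of_pos h,
    PySem.Int.mod_eq_emod_of_pos h]
  conv_lhs => rw [Int.add_emod, Int.emod_emod_of_dvd _ dvd_rfl, ← Int.add_emod]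
theorem pvmod_idem_sub (u d n : Int) (h : 0 < n) :
    PySem.Int.mod (PySem.Int.mod u n - d) n = PySem.Int.mod (u - d) n := by
  rw [PySem.Int.mod_eq_emod_of_pos h, PySem.Int.mod_eq_emod_of_pos h,
    PySem.Int.mod_eq_emod_of_pos h]
  conv_lhs => rw [Int.sub_emod, Int.emod_emod_of_dvd _ dvd_rfl, ← Int.sub_emod]
theorem pvmod_self (i n : Int) (h0 : 0 ≤ i) (h : i < n) : PySem.Int.mod i n = i := by
  rw [PySem.Int.mod_eq_emod_of_pos (lt_of_le_of_lt h0 h)]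
  exact Int.emod_eq_of_lt h0 h
theorem pvmod_cancel_add (i d n : Int) (hn : 0 < n) (h0 : 0 ≤ i) (h : i < n) :
    PySem.Int.mod (PySem.Int.mod (i - d) n + d) n = i := by
  rw [pvmod_idem_add _ _ _ hn, sub_add_cancel, pvmod_self _ _ h0 h]
theorem pvmod_cancel_sub (a d n : Int) (hn : 0 < n) (h0 : 0 ≤ a) (h : a < n) :
    PySem.Int.mod (PySem.Int.mod (a + d) n - d) n = a := by
  rw [pvmod_idem_sub _ _ _ hn, add_sub_cancel_right, pvmod_self _ _ h0 h]

-- reading a cell of a range×range grid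
theorem pvGet2_grid {α : Type} (g : Int → Int → α) (d : α) (n m i j : Int)
    (hi0 : 0 ≤ i) (hin : i < n) (hj0 : 0 ≤ j) (hjm : j < m) :
    PySem.List.pyGetD (PySem.List.pyGetD
        ((PySem.List.pyRange 0 n 1).map (fun i => (PySem.List.pyRange 0 m 1).map (g i))) i []) j d
      = g i j := by
  rw [PySem.List.pyGetD_map_pyRange_of_nonneg _ _ _ _ hi0 hin,
    PySem.List.pyGetD_map_pyRange_of_nonneg _ _ _ _ hj0 hjm]

-- passability of a cell, as a Prop
def pvPass (grid : List String) (i j : Int) : Prop :=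
  PySem.Str.pyGet? (PySem.List.pyGetD grid i "") j ≠ some '#'

theorem pv_mem_pvB0 (grid : List String) (n m x y i j : Int) (o : Int × Int) :
    o ∈ pvB0 grid n m x y i j ↔ ∃ dd ∈ pvMoves,
      (PySem.Int.mod (x + dd.1) n = i ∧ PySem.Int.mod (y + dd.2) m = j ∧ pvPass grid i j) ∧
      o = ((if i == (0 : Int) then dd.1 else 0), (if j == (0 : Int) then dd.2 else 0)) := by
  unfold pvB0 pvPass
  rw [PySem.Set.mem_ofList]
  simp only [List.mem_map, List.mem_filter, Bool.and_eq_true, beq_iff_eq, bne_iff_ne,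
    Prod.mk.injEq, ne_eq]
  constructor
  · rintro ⟨dd, ⟨hdd, ⟨h1, h2⟩, h3⟩, rfl⟩
    exact ⟨dd, hdd, ⟨h1, h2, h3⟩, rfl⟩
  · rintro ⟨dd, hdd, ⟨h1, h2, h3⟩, rfl⟩
    exact ⟨dd, ⟨hdd, ⟨h1, h2⟩, h3⟩, rfl⟩

theorem pv_mem_pvInc1 (grid : List String) (n m i j : Int) (e : PvSt) :
    e ∈ pvInc1 grid n m i j ↔ pvPass grid i j ∧ ∃ dd ∈ pvMoves,
      e = (PySem.Int.mod (i - dd.1) n, PySem.Int.mod (j - dd.2) m,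
        (if i == (0 : Int) then dd.1 else 0), (if j == (0 : Int) then dd.2 else 0)) := by
  unfold pvInc1 pvPass
  by_cases h : (PySem.Str.pyGet? (PySem.List.pyGetD grid i "") j == some '#') = true
  · rw [if_pos h]
    rw [beq_iff_eq] at h
    simp only [List.not_mem_nil, false_iff, not_and, ne_eq]
    intro hp
    exact absurd h hp
  · rw [if_neg h]
    rw [beq_iff_eq] at h
    simp only [List.mem_map, ne_eq, h, not_false_iff, true_and]
    constructor
    · rintro ⟨dd, hdd, rfl⟩; exact ⟨dd, hdd, rfl⟩
    · rintro ⟨dd, hdd, rfl⟩; exact ⟨dd, hdd, rfl⟩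

theorem pv_mem_pvInc2 (grid : List String) (n m i j : Int) (e : PvSt) :
    e ∈ pvInc2 grid n m i j ↔ pvPass grid i j ∧ ∃ d2 ∈ pvMoves,
      pvPass grid (PySem.Int.mod (i - d2.1) n) (PySem.Int.mod (j - d2.2) m) ∧ ∃ d1 ∈ pvMoves,
      e = (PySem.Int.mod (PySem.Int.mod (i - d2.1) n - d1.1) n,
           PySem.Int.mod (PySem.Int.mod (j - d2.2) m - d1.2) m,
           (if PySem.Int.mod (i - d2.1) n == (0 : Int) then d1.1 else 0) +
             (if i == (0 : Int) then d2.1 else 0),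
           (if PySem.Int.mod (j - d2.2) m == (0 : Int) then d1.2 else 0) +
             (if j == (0 : Int) then d2.2 else 0)) := by
  unfold pvInc2 pvPass
  by_cases h : (PySem.Str.pyGet? (PySem.List.pyGetD grid i "") j == some '#') = true
  · rw [if_pos h]
    rw [beq_iff_eq] at h
    simp only [List.not_mem_nil, false_iff, not_and, ne_eq]
    intro hp
    exact absurd h hp
  · rw [if_neg h]
    rw [beq_iff_eq] at h
    simp only [List.mem_flatMap, List.mem_filter, List.mem_map, bne_iff_ne, ne_eq, h,
      not_false_iff, true_and]
    constructor
    · rintro ⟨d2, ⟨hd2, hp⟩, d1, hd1, rfl⟩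
      exact ⟨d2, hd2, hp, d1, hd1, rfl⟩
    · rintro ⟨d2, hd2, hp, d1, hd1, rfl⟩
      exact ⟨d2, ⟨hd2, hp⟩, d1, hd1, rfl⟩

-- the invariant: cell (i, j) of the offset grid holds exactly the offsets of the
-- frontier states at that cell
def pvRel (grid : List String) (O : List (List (PySem.Set (Int × Int)))) (F : PySem.Set PvSt) : Prop :=
  ∀ i j o1 o2, 0 ≤ i → i < (grid.length : Int) → 0 ≤ j →
    j < PySem.Str.len (PySem.List.pyGetD grid 0 "") →
    ((o1, o2) ∈ PySem.List.pyGetD (PySem.List.pyGetD O i []) j [] ↔ ((i, j, o1, o2) : PvSt) ∈ F)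

theorem pv_mem_pvBstep (grid : List String) (O : List (List (PySem.Set (Int × Int))))
    (tab : Int → Int → List PvSt) (i j : Int) (o : Int × Int)
    (hi0 : 0 ≤ i) (hin : i < (grid.length : Int)) (hj0 : 0 ≤ j)
    (hjm : j < PySem.Str.len (PySem.List.pyGetD grid 0 "")) :
    o ∈ PySem.List.pyGetD (PySem.List.pyGetD
        (pvBstep (grid.length : Int) (PySem.Str.len (PySem.List.pyGetD grid 0 "")) O
          ((PySem.List.pyRange 0 (grid.length : Int) 1).map (fun i =>
            (PySem.List.pyRange 0 (PySem.Str.len (PySem.List.pyGetD grid 0 "")) 1).map (tab i))))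
        i []) j [] ↔
      ∃ e ∈ tab i j, ∃ o0 ∈ PySem.List.pyGetD (PySem.List.pyGetD O e.1 []) e.2.1 [],
        o = (e.2.2.1 + o0.1, e.2.2.2 + o0.2) := by
  unfold pvBstep
  rw [pvGet2_grid _ _ _ _ _ _ hi0 hin hj0 hjm, PySem.Set.mem_ofList]
  rw [pvGet2_grid _ _ _ _ _ _ hi0 hin hj0 hjm]
  simp only [List.mem_flatMap, List.mem_map]
  constructor
  · rintro ⟨e, he, o0, ho0, rfl⟩; exact ⟨e, he, o0, ho0, rfl⟩
  · rintro ⟨e, he, o0, ho0, rfl⟩; exact ⟨e, he, o0, ho0, rfl⟩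

theorem pvOK_iff (grid : List String) (st : PvSt) (dd : Int × Int) :
    pvOK grid st dd = true ↔
      pvPass grid (PySem.Int.mod (st.1 + dd.1) (grid.length : Int))
        (PySem.Int.mod (st.2.1 + dd.2) (PySem.Str.len (PySem.List.pyGetD grid 0 ""))) := by
  unfold pvOK pvPass
  exact bne_iff_ne

theorem pvRel_base (grid : List String) (x y : Int) :
    pvRel grid ((PySem.List.pyRange 0 (grid.length : Int) 1).map (fun i =>
        (PySem.List.pyRange 0 (PySem.Str.len (PySem.List.pyGetD grid 0 "")) 1).map (fun j =>
          pvB0 grid (grid.length : Int) (PySem.Str.len (PySem.List.pyGetD grid 0 "")) x y i j)))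
      (pvF grid (PySem.Set.add PySem.Set.empty (x, y, 0, 0))) := by
  intro i j o1 o2 hi0 hin hj0 hjm
  rw [pvGet2_grid (fun i j => pvB0 grid (grid.length : Int)
    (PySem.Str.len (PySem.List.pyGetD grid 0 "")) x y i j) _ _ _ _ _ hi0 hin hj0 hjm]
  rw [pv_mem_pvB0, pv_mem_pvF]
  constructor
  · rintro ⟨dd, hdd, ⟨h1, h2, h3⟩, ho⟩
    rw [Prod.mk.injEq] at ho
    refine ⟨(x, y, 0, 0), by simp [PySem.Set.empty], dd, hdd, ?_, ?_⟩
    · rw [pvOK_iff]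
      show pvPass grid (PySem.Int.mod (x + dd.1) _) (PySem.Int.mod (y + dd.2) _)
      rw [h1, h2]; exact h3
    · show _ = ((PySem.Int.mod (x + dd.1) _ : Int), (PySem.Int.mod (y + dd.2) _ : Int),
        ((0 : Int) + _), ((0 : Int) + _))
      rw [h1, h2, Prod.mk.injEq, Prod.mk.injEq, Prod.mk.injEq]
      exact ⟨rfl, rfl, by rw [ho.1, zero_add], by rw [ho.2, zero_add]⟩
  · rintro ⟨st, hst, dd, hdd, hok, hz⟩
    simp only [PySem.Set.mem_add, PySem.Set.empty, List.not_mem_nil, false_or] at hst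
    subst hst
    simp only [pvNext, Prod.mk.injEq] at hz
    obtain ⟨hi, hj, ho1, ho2⟩ := hz
    rw [pvOK_iff] at hok
    simp only at hok
    refine ⟨dd, hdd, ⟨hi.symm, hj.symm, ?_⟩, ?_⟩
    · rw [← hi, ← hj] at hok
      exact hok
    · rw [← hi] at ho1
      rw [← hj] at ho2
      rw [Prod.mk.injEq]
      exact ⟨by rw [ho1, zero_add], by rw [ho2, zero_add]⟩

theorem pvRel_step1 (grid : List String) (O : List (List (PySem.Set (Int × Int))))
    (F : PySem.Set PvSt)
    (hn : 0 < (grid.length : Int)) (hm : 0 < PySem.Str.len (PySem.List.pyGetD grid 0 ""))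
    (hrel : pvRel grid O F) (hF : ∀ z ∈ F, pvInb grid z) :
    pvRel grid (pvBstep (grid.length : Int) (PySem.Str.len (PySem.List.pyGetD grid 0 "")) O
        ((PySem.List.pyRange 0 (grid.length : Int) 1).map (fun i =>
          (PySem.List.pyRange 0 (PySem.Str.len (PySem.List.pyGetD grid 0 "")) 1).map (fun j =>
            pvInc1 grid (grid.length : Int) (PySem.Str.len (PySem.List.pyGetD grid 0 "")) i j))))
      (pvF grid F) := by
  intro i j o1 o2 hi0 hin hj0 hjm
  rw [pv_mem_pvBstep grid O
    (pvInc1 grid (grid.length : Int) (PySem.Str.len (PySem.List.pyGetD grid 0 "")))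
    i j (o1, o2) hi0 hin hj0 hjm]
  rw [pv_mem_pvF]
  constructor
  · rintro ⟨e, he, o0, ho0, ho⟩
    rw [pv_mem_pvInc1] at he
    obtain ⟨hp, dd, hdd, rfl⟩ := he
    simp only at ho0 ho
    rw [hrel _ _ _ _ (PySem.Int.mod_nonneg _ hn) (PySem.Int.mod_lt _ hn)
      (PySem.Int.mod_nonneg _ hm) (PySem.Int.mod_lt _ hm)] at ho0
    refine ⟨_, ho0, dd, hdd, ?_, ?_⟩
    · rw [pvOK_iff]
      show pvPass grid (PySem.Int.mod (PySem.Int.mod (i - dd.1) _ + dd.1) _)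
        (PySem.Int.mod (PySem.Int.mod (j - dd.2) _ + dd.2) _)
      rw [pvmod_cancel_add _ _ _ hn hi0 hin, pvmod_cancel_add _ _ _ hm hj0 hjm]
      exact hp
    · show _ = ((PySem.Int.mod (PySem.Int.mod (i - dd.1) _ + dd.1) _ : Int),
        (PySem.Int.mod (PySem.Int.mod (j - dd.2) _ + dd.2) _ : Int), (_ + _ : Int), (_ + _ : Int))
      rw [pvmod_cancel_add _ _ _ hn hi0 hin, pvmod_cancel_add _ _ _ hm hj0 hjm]
      rw [Prod.mk.injEq] at ho
      simp only [Prod.mk.injEq, true_and]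
      constructor
      · rw [ho.1]; ring
      · rw [ho.2]; ring
  · rintro ⟨st, hst, dd, hdd, hok, hz⟩
    obtain ⟨hb1, hb2, hb3, hb4⟩ := hF st hst
    simp only [pvNext, Prod.mk.injEq] at hz
    obtain ⟨hi, hj, ho1, ho2⟩ := hz
    rw [pvOK_iff] at hok
    refine ⟨(PySem.Int.mod (i - dd.1) (grid.length : Int),
      PySem.Int.mod (j - dd.2) (PySem.Str.len (PySem.List.pyGetD grid 0 "")),
      (if i == (0 : Int) then dd.1 else 0), (if j == (0 : Int) then dd.2 else 0)), ?_, ?_⟩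
    · rw [pv_mem_pvInc1]
      refine ⟨?_, dd, hdd, rfl⟩
      rw [← hi, ← hj] at hok
      exact hok
    · have he1 : PySem.Int.mod (i - dd.1) (grid.length : Int) = st.1 := by
        rw [hi, pvmod_cancel_sub _ _ _ hn hb1 hb2]
      have he2 : PySem.Int.mod (j - dd.2) (PySem.Str.len (PySem.List.pyGetD grid 0 "")) = st.2.1 := by
        rw [hj, pvmod_cancel_sub _ _ _ hm hb3 hb4]
      simp only [he1, he2]
      refine ⟨(st.2.2.1, st.2.2.2), ?_, ?_⟩
      · rw [hrel _ _ _ _ hb1 hb2 hb3 hb4]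
        exact hst
      · simp only [Prod.mk.injEq]
        rw [← hi] at ho1
        rw [← hj] at ho2
        exact ⟨by rw [ho1]; ring, by rw [ho2]; ring⟩

theorem pvRel_step2 (grid : List String) (O : List (List (PySem.Set (Int × Int))))
    (F : PySem.Set PvSt)
    (hn : 0 < (grid.length : Int)) (hm : 0 < PySem.Str.len (PySem.List.pyGetD grid 0 ""))
    (hrel : pvRel grid O F) (hF : ∀ z ∈ F, pvInb grid z) :
    pvRel grid (pvBstep (grid.length : Int) (PySem.Str.len (PySem.List.pyGetD grid 0 "")) O
        ((PySem.List.pyRange 0 (grid.length : Int) 1).map (fun i =>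
          (PySem.List.pyRange 0 (PySem.Str.len (PySem.List.pyGetD grid 0 "")) 1).map (fun j =>
            pvInc2 grid (grid.length : Int) (PySem.Str.len (PySem.List.pyGetD grid 0 "")) i j))))
      (pvF grid (pvF grid F)) := by
  intro i j o1 o2 hi0 hin hj0 hjm
  rw [pv_mem_pvBstep grid O
    (pvInc2 grid (grid.length : Int) (PySem.Str.len (PySem.List.pyGetD grid 0 "")))
    i j (o1, o2) hi0 hin hj0 hjm]
  rw [pv_mem_pvF]
  constructor
  · rintro ⟨e, he, o0, ho0, ho⟩
    rw [pv_mem_pvInc2] at he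
    obtain ⟨hp, d2, hd2, hpmid, d1, hd1, rfl⟩ := he
    simp only at ho0 ho
    rw [Prod.mk.injEq] at ho
    rw [hrel _ _ _ _ (PySem.Int.mod_nonneg _ hn) (PySem.Int.mod_lt _ hn)
      (PySem.Int.mod_nonneg _ hm) (PySem.Int.mod_lt _ hm)] at ho0
    have c1 : PySem.Int.mod (PySem.Int.mod (PySem.Int.mod (i - d2.1) (grid.length : Int) - d1.1)
        (grid.length : Int) + d1.1) (grid.length : Int)
        = PySem.Int.mod (i - d2.1) (grid.length : Int) :=
      pvmod_cancel_add _ _ _ hn (PySem.Int.mod_nonneg _ hn) (PySem.Int.mod_lt _ hn)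
    have c2 : PySem.Int.mod (PySem.Int.mod (PySem.Int.mod (j - d2.2)
        (PySem.Str.len (PySem.List.pyGetD grid 0 "")) - d1.2)
        (PySem.Str.len (PySem.List.pyGetD grid 0 "")) + d1.2)
        (PySem.Str.len (PySem.List.pyGetD grid 0 ""))
        = PySem.Int.mod (j - d2.2) (PySem.Str.len (PySem.List.pyGetD grid 0 "")) :=
      pvmod_cancel_add _ _ _ hm (PySem.Int.mod_nonneg _ hm) (PySem.Int.mod_lt _ hm)
    have c3 : PySem.Int.mod (PySem.Int.mod (i - d2.1) (grid.length : Int) + d2.1)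
        (grid.length : Int) = i := pvmod_cancel_add _ _ _ hn hi0 hin
    have c4 : PySem.Int.mod (PySem.Int.mod (j - d2.2)
        (PySem.Str.len (PySem.List.pyGetD grid 0 "")) + d2.2)
        (PySem.Str.len (PySem.List.pyGetD grid 0 "")) = j := pvmod_cancel_add _ _ _ hm hj0 hjm
    refine ⟨pvNext grid (PySem.Int.mod (PySem.Int.mod (i - d2.1) (grid.length : Int) - d1.1)
        (grid.length : Int),
      PySem.Int.mod (PySem.Int.mod (j - d2.2) (PySem.Str.len (PySem.List.pyGetD grid 0 "")) - d1.2)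
        (PySem.Str.len (PySem.List.pyGetD grid 0 "")), o0.1, o0.2) d1, ?_, d2, hd2, ?_, ?_⟩
    · rw [pv_mem_pvF]
      refine ⟨_, ho0, d1, hd1, ?_, rfl⟩
      rw [pvOK_iff]
      simp only [c1, c2]
      exact hpmid
    · rw [pvOK_iff]
      simp only [pvNext, c1, c2, c3, c4]
      exact hp
    · simp only [pvNext, c1, c2, c3, c4, Prod.mk.injEq, true_and]
      constructor
      · rw [ho.1]; ring
      · rw [ho.2]; ring
  · rintro ⟨w, hw, d2, hd2, hok2, hz⟩
    rw [pv_mem_pvF] at hw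
    obtain ⟨st, hst, d1, hd1, hok1, hw⟩ := hw
    obtain ⟨hb1, hb2, hb3, hb4⟩ := hF st hst
    subst hw
    simp only [pvNext, Prod.mk.injEq] at hz
    obtain ⟨hi, hj, ho1, ho2⟩ := hz
    rw [pvOK_iff] at hok1 hok2
    simp only [pvNext] at hok2 ho1 ho2 hi hj
    have ha : PySem.Int.mod (i - d2.1) (grid.length : Int)
        = PySem.Int.mod (st.1 + d1.1) (grid.length : Int) := by
      rw [hi, pvmod_cancel_sub _ _ _ hn (PySem.Int.mod_nonneg _ hn) (PySem.Int.mod_lt _ hn)]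
    have hb : PySem.Int.mod (j - d2.2) (PySem.Str.len (PySem.List.pyGetD grid 0 ""))
        = PySem.Int.mod (st.2.1 + d1.2) (PySem.Str.len (PySem.List.pyGetD grid 0 "")) := by
      rw [hj, pvmod_cancel_sub _ _ _ hm (PySem.Int.mod_nonneg _ hm) (PySem.Int.mod_lt _ hm)]
    refine ⟨(PySem.Int.mod (PySem.Int.mod (i - d2.1) (grid.length : Int) - d1.1)
        (grid.length : Int),
      PySem.Int.mod (PySem.Int.mod (j - d2.2) (PySem.Str.len (PySem.List.pyGetD grid 0 "")) - d1.2)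
        (PySem.Str.len (PySem.List.pyGetD grid 0 "")),
      (if PySem.Int.mod (i - d2.1) (grid.length : Int) == (0 : Int) then d1.1 else 0) +
        (if i == (0 : Int) then d2.1 else 0),
      (if PySem.Int.mod (j - d2.2) (PySem.Str.len (PySem.List.pyGetD grid 0 "")) == (0 : Int)
        then d1.2 else 0) + (if j == (0 : Int) then d2.2 else 0)), ?_, ?_⟩
    · rw [pv_mem_pvInc2]
      refine ⟨?_, d2, hd2, ?_, d1, hd1, rfl⟩
      · rw [← hi, ← hj] at hok2
        exact hok2
      · rw [ha, hb]
        exact hok1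
    · have he1 : PySem.Int.mod (PySem.Int.mod (i - d2.1) (grid.length : Int) - d1.1)
          (grid.length : Int) = st.1 := by
        rw [ha, pvmod_cancel_sub _ _ _ hn hb1 hb2]
      have he2 : PySem.Int.mod (PySem.Int.mod (j - d2.2)
          (PySem.Str.len (PySem.List.pyGetD grid 0 "")) - d1.2)
          (PySem.Str.len (PySem.List.pyGetD grid 0 "")) = st.2.1 := by
        rw [hb, pvmod_cancel_sub _ _ _ hm hb3 hb4]
      simp only [he1, he2]
      refine ⟨(st.2.2.1, st.2.2.2), ?_, ?_⟩
      · rw [hrel _ _ _ _ hb1 hb2 hb3 hb4]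
        exact hst
      · simp only [Prod.mk.injEq]
        simp only [← hi] at ho1
        simp only [← hj] at ho2
        simp only [ha, hb]
        exact ⟨by rw [ho1]; ring, by rw [ho2]; ring⟩

def pvGridOf (n m : Int) (g : Int → Int → PySem.Set (Int × Int)) :
    List (List (PySem.Set (Int × Int))) :=
  (PySem.List.pyRange 0 n 1).map (fun i => (PySem.List.pyRange 0 m 1).map (g i))

theorem pv_sum_flatMap {α : Type} (l : List α) (f : α → List Int) :
    (l.flatMap f).sum = (l.map (fun x => (f x).sum)).sum := by
  induction l with
  | nil => rfl
  | cons a l ih => simp [List.flatMap_cons, List.sum_append, ih]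

theorem pv_sum_range (N : Nat) (f : Nat → Int) :
    ((List.range N).map f).sum = ∑ i ∈ Finset.range N, f i := by
  induction N with
  | zero => rfl
  | succ N ih => rw [List.range_succ, Finset.sum_range_succ, List.map_append, List.sum_append, ih]; simp

theorem pv_cell_len (g : Int → Int → PySem.Set (Int × Int)) (F : List PvSt) (i j : Int)
    (hrel : ∀ o1 o2 : Int, (o1, o2) ∈ g i j ↔ ((i, j, o1, o2) : PvSt) ∈ F)
    (hgn : (g i j).Nodup) (hFn : F.Nodup) :
    PySem.Set.len (g i j)
      = ((F.filter (fun z => z.1 == i && z.2.1 == j)).length : Int) := by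
  have hperm : (g i j).Perm ((F.filter (fun z => z.1 == i && z.2.1 == j)).map
      (fun z => (z.2.2.1, z.2.2.2))) := by
    rw [List.perm_ext_iff_of_nodup hgn]
    · intro o
      obtain ⟨o1, o2⟩ := o
      rw [hrel o1 o2]
      simp only [List.mem_map, List.mem_filter, Bool.and_eq_true, beq_iff_eq]
      constructor
      · intro h
        exact ⟨(i, j, o1, o2), ⟨h, rfl, rfl⟩, rfl⟩
      · rintro ⟨z, ⟨hz, h1, h2⟩, h3⟩
        rw [Prod.mk.injEq] at h3
        have : z = (i, j, o1, o2) := by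
          obtain ⟨a, b, c, d⟩ := z
          simp only at h1 h2 h3
          simp [h1, h2, h3.1, h3.2]
        rwa [this] at hz
    · apply List.Nodup.map_on
      · intro z1 hz1 z2 hz2 heq
        rw [List.mem_filter, Bool.and_eq_true, beq_iff_eq, beq_iff_eq] at hz1 hz2
        obtain ⟨a1, b1, c1, d1⟩ := z1
        obtain ⟨a2, b2, c2, d2⟩ := z2
        simp only at hz1 hz2
        rw [Prod.mk.injEq] at heq
        simp only at heq
        simp [hz1.2.1, hz1.2.2, hz2.2.1, hz2.2.2, heq.1, heq.2]
      · exact List.Nodup.filter _ hFn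
  unfold PySem.Set.len
  rw [hperm.length_eq, List.length_map]

theorem pv_len_partition (F : List PvSt) (N M : Nat)
    (hFb : ∀ z ∈ F, 0 ≤ z.1 ∧ z.1 < (N : Int) ∧ 0 ≤ z.2.1 ∧ z.2.1 < (M : Int)) :
    (∑ k ∈ Finset.range N, ∑ l ∈ Finset.range M,
      ((F.filter (fun z => z.1 == ((k : Nat) : Int) && z.2.1 == ((l : Nat) : Int))).length : Int))
      = (F.length : Int) := by
  induction F with
  | nil => simp
  | cons z F ih =>
    have hzb := hFb z (List.mem_cons_self)
    have hFb' : ∀ w ∈ F, 0 ≤ w.1 ∧ w.1 < (N : Int) ∧ 0 ≤ w.2.1 ∧ w.2.1 < (M : Int) :=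
      fun w hw => hFb w (List.mem_cons_of_mem _ hw)
    have hsplit : ∀ (k l : Nat),
        ((((z :: F).filter (fun z => z.1 == ((k : Nat) : Int) && z.2.1 == ((l : Nat) : Int))).length : Int))
        = ((F.filter (fun z => z.1 == ((k : Nat) : Int) && z.2.1 == ((l : Nat) : Int))).length : Int)
          + (if k = z.1.toNat ∧ l = z.2.1.toNat then (1 : Int) else 0) := by
      intro k l
      rw [List.filter_cons]
      have hcond : (z.1 == ((k : Nat) : Int) && z.2.1 == ((l : Nat) : Int)) = true
          ↔ (k = z.1.toNat ∧ l = z.2.1.toNat) := by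
        rw [Bool.and_eq_true, beq_iff_eq, beq_iff_eq]
        constructor
        · rintro ⟨h1, h2⟩; constructor <;> omega
        · rintro ⟨h1, h2⟩; constructor <;> omega
      by_cases hc : k = z.1.toNat ∧ l = z.2.1.toNat
      · rw [if_pos (hcond.mpr hc), if_pos hc]
        simp only [List.length_cons]
        push_cast
        ring
      · rw [if_neg (fun h => hc (hcond.mp h)), if_neg hc]
        ring
    simp only [hsplit]
    rw [Finset.sum_congr rfl (fun k _ => Finset.sum_add_distrib)]
    rw [Finset.sum_add_distrib, ih hFb']
    have hind : (∑ k ∈ Finset.range N, ∑ l ∈ Finset.range M,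
        (if k = z.1.toNat ∧ l = z.2.1.toNat then (1 : Int) else 0)) = 1 := by
      have hinner : ∀ k ∈ Finset.range N, (∑ l ∈ Finset.range M,
          (if k = z.1.toNat ∧ l = z.2.1.toNat then (1 : Int) else 0))
          = (if k = z.1.toNat then (1 : Int) else 0) := by
        intro k _
        by_cases hk : k = z.1.toNat
        · subst hk
          simp only [true_and, if_true]
          rw [Finset.sum_ite_eq' (Finset.range M) z.2.1.toNat (fun _ => (1 : Int))]
          rw [if_pos (Finset.mem_range.mpr (by omega))]
        · simp [hk]
      rw [Finset.sum_congr rfl hinner]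
      rw [Finset.sum_ite_eq' (Finset.range N) z.1.toNat (fun _ => (1 : Int))]
      rw [if_pos (Finset.mem_range.mpr (by omega))]
    rw [hind]
    simp only [List.length_cons]
    push_cast
    ring

theorem pv_count (g : Int → Int → PySem.Set (Int × Int)) (F : List PvSt) (N M : Nat)
    (hrel : ∀ (i j o1 o2 : Int), 0 ≤ i → i < (N : Int) → 0 ≤ j → j < (M : Int) →
      ((o1, o2) ∈ g i j ↔ ((i, j, o1, o2) : PvSt) ∈ F))
    (hgn : ∀ i j, (g i j).Nodup) (hFn : F.Nodup)
    (hFb : ∀ z ∈ F, 0 ≤ z.1 ∧ z.1 < (N : Int) ∧ 0 ≤ z.2.1 ∧ z.2.1 < (M : Int)) :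
    ((pvGridOf (N : Int) (M : Int) g).flatMap (fun row => row.map PySem.Set.len)).sum
      = (F.length : Int) := by
  unfold pvGridOf
  rw [pv_sum_flatMap]
  simp only [PySem.List.pyRange_zero, Int.toNat_natCast, List.map_map]
  rw [pv_sum_range]
  refine (Finset.sum_congr rfl ?_).trans (pv_len_partition F N M hFb)
  intro k hk
  simp only [Function.comp, List.map_map]
  rw [pv_sum_range]
  apply Finset.sum_congr rfl
  intro l hl
  rw [Finset.mem_range] at hk hl
  simp only [Function.comp]
  apply pv_cell_len g F _ _ _ (hgn _ _) hFn
  intro o1 o2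
  exact hrel _ _ o1 o2 (by omega) (by omega) (by omega) (by omega)

def pvShape (n m : Int) (O : List (List (PySem.Set (Int × Int)))) : Prop :=
  ∃ g, O = pvGridOf n m g ∧ ∀ i j, (g i j).Nodup

theorem pvShape_pvBstep (n m : Int) (O : List (List (PySem.Set (Int × Int))))
    (tab : List (List (List PvSt))) : pvShape n m (pvBstep n m O tab) :=
  ⟨fun i j => PySem.Set.ofList ((PySem.List.pyGetD (PySem.List.pyGetD tab i []) j []).flatMap
      (fun e => (PySem.List.pyGetD (PySem.List.pyGetD O e.1 []) e.2.1 []).map (fun o =>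
        (e.2.2.1 + o.1, e.2.2.2 + o.2)))),
    rfl, fun _ _ => PySem.Set.nodup_ofList _⟩

theorem pv_nodup_iter (grid : List String) (k : Nat) :
    ∀ F : PySem.Set PvSt, ((pvF grid)^[k] (pvF grid F)).Nodup := by
  induction k with
  | zero => exact fun F => pv_nodup_pvF grid F
  | succ k ih =>
    intro F
    rw [Function.iterate_succ_apply]
    exact ih (pvF grid F)

theorem pv_iter2 (grid : List String)
    (hn : 0 < (grid.length : Int)) (hm : 0 < PySem.Str.len (PySem.List.pyGetD grid 0 "")) :
    ∀ (k : Nat) (O : List (List (PySem.Set (Int × Int)))) (F : PySem.Set PvSt),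
      pvRel grid O F → (∀ z ∈ F, pvInb grid z) →
      pvShape (grid.length : Int) (PySem.Str.len (PySem.List.pyGetD grid 0 "")) O →
      pvRel grid ((List.replicate k ((PySem.List.pyRange 0 (grid.length : Int) 1).map (fun i =>
          (PySem.List.pyRange 0 (PySem.Str.len (PySem.List.pyGetD grid 0 "")) 1).map (fun j =>
            pvInc2 grid (grid.length : Int) (PySem.Str.len (PySem.List.pyGetD grid 0 "")) i j)))).foldl
          (pvBstep (grid.length : Int) (PySem.Str.len (PySem.List.pyGetD grid 0 ""))) O)
        ((pvF grid)^[2 * k] F)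
      ∧ (∀ z ∈ (pvF grid)^[2 * k] F, pvInb grid z)
      ∧ pvShape (grid.length : Int) (PySem.Str.len (PySem.List.pyGetD grid 0 ""))
          ((List.replicate k ((PySem.List.pyRange 0 (grid.length : Int) 1).map (fun i =>
            (PySem.List.pyRange 0 (PySem.Str.len (PySem.List.pyGetD grid 0 "")) 1).map (fun j =>
              pvInc2 grid (grid.length : Int) (PySem.Str.len (PySem.List.pyGetD grid 0 "")) i j)))).foldl
            (pvBstep (grid.length : Int) (PySem.Str.len (PySem.List.pyGetD grid 0 ""))) O) := by
  intro k
  induction k with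
  | zero =>
    intro O F hrel hinb hshape
    exact ⟨hrel, hinb, hshape⟩
  | succ k ih =>
    intro O F hrel hinb hshape
    rw [List.replicate_succ, List.foldl_cons]
    have hrel2 := pvRel_step2 grid O F hn hm hrel hinb
    have hinb2 : ∀ z ∈ pvF grid (pvF grid F), pvInb grid z :=
      fun z hz => pv_bounds_pvF grid _ z hn hm hz
    obtain ⟨h1, h2, h3⟩ := ih _ _ hrel2 hinb2 (pvShape_pvBstep _ _ _ _)
    have hiter : (pvF grid)^[2 * (k + 1)] F = (pvF grid)^[2 * k] (pvF grid (pvF grid F)) := by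
      rw [show 2 * (k + 1) = 2 * k + 2 by ring, Function.iterate_add_apply]
      congr 1
    rw [hiter]
    exact ⟨h1, h2, h3⟩

theorem pv_count' (g : Int → Int → PySem.Set (Int × Int)) (F : List PvSt) (n m : Int)
    (hn : 0 ≤ n) (hm : 0 ≤ m)
    (hrel : ∀ (i j o1 o2 : Int), 0 ≤ i → i < n → 0 ≤ j → j < m →
      ((o1, o2) ∈ g i j ↔ ((i, j, o1, o2) : PvSt) ∈ F))
    (hgn : ∀ i j, (g i j).Nodup) (hFn : F.Nodup)
    (hFb : ∀ z ∈ F, 0 ≤ z.1 ∧ z.1 < n ∧ 0 ≤ z.2.1 ∧ z.2.1 < m) :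
    ((pvGridOf n m g).flatMap (fun row => row.map PySem.Set.len)).sum = (F.length : Int) := by
  lift n to Nat using hn with N
  lift m to Nat using hm with M
  exact pv_count g F N M hrel hgn hFn hFb

theorem reachable_tiles_equalP (grid : List String) (x y max_steps : Int)
    (hpre : Pre_reachable_tiles grid x y max_steps) :
    reachable_tiles grid x y max_steps = reachable_tiles_alt grid x y max_steps := by
  obtain ⟨h0, hrest⟩ := hpre
  by_cases hz : max_steps = 0
  · subst hz
    rw [reachable_tiles_A_iter grid x y 0 le_rfl]
    rfl
  · have hpos : 0 < max_steps := by omega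
    rcases hrest with h | ⟨hne, hw, _⟩
    · omega
    have hgd : PySem.List.pyGetD grid 0 "" = grid.headD "" := by
      cases grid with
      | nil => exact absurd rfl hne
      | cons g gs =>
          rw [show ((0 : Int)) = ((0 : Nat) : Int) from rfl, PySem.List.pyGetD_natCast]
          rfl
    have hn : 0 < (grid.length : Int) := by
      cases grid with
      | nil => exact absurd rfl hne
      | cons g gs => simp
    have hm : 0 < PySem.Str.len (PySem.List.pyGetD grid 0 "") := by rw [hgd]; exact hw
    have key : ∀ (g : Int → Int → PySem.Set (Int × Int)) (F : PySem.Set PvSt),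
        pvRel grid (pvGridOf (grid.length : Int)
          (PySem.Str.len (PySem.List.pyGetD grid 0 "")) g) F →
        (∀ i j, (g i j).Nodup) → F.Nodup → (∀ z ∈ F, pvInb grid z) →
        ((pvGridOf (grid.length : Int) (PySem.Str.len (PySem.List.pyGetD grid 0 "")) g).flatMap
          (fun row => row.map PySem.Set.len)).sum = (F.length : Int) := by
      intro g F hrel hgn hFn hFb
      apply pv_count' g F _ _ (by omega) (by omega)
      · intro i j o1 o2 hi0 hin hj0 hjm
        have hcell := pvGet2_grid g ([] : PySem.Set (Int × Int))
          (grid.length : Int) (PySem.Str.len (PySem.List.pyGetD grid 0 "")) i j hi0 hin hj0 hjm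
        unfold pvGridOf at hrel
        rw [← hcell]
        exact hrel i j o1 o2 hi0 hin hj0 hjm
      · exact hgn
      · exact hFn
      · exact hFb
    rw [reachable_tiles_A_iter grid x y max_steps h0]
    unfold reachable_tiles_alt
    rw [if_neg (by omega)]
    dsimp only
    rw [List.foldl_append]
    have hbase := pvRel_base grid x y
    have hbinb : ∀ z ∈ pvF grid (PySem.Set.add PySem.Set.empty (x, y, 0, 0)), pvInb grid z :=
      fun z hz => pv_bounds_pvF grid _ z hn hm hz
    have hbshape : pvShape (grid.length : Int) (PySem.Str.len (PySem.List.pyGetD grid 0 ""))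
        ((PySem.List.pyRange 0 (grid.length : Int) 1).map (fun i =>
          (PySem.List.pyRange 0 (PySem.Str.len (PySem.List.pyGetD grid 0 "")) 1).map (fun j =>
            pvB0 grid (grid.length : Int) (PySem.Str.len (PySem.List.pyGetD grid 0 "")) x y i j))) :=
      ⟨fun i j => pvB0 grid (grid.length : Int)
          (PySem.Str.len (PySem.List.pyGetD grid 0 "")) x y i j,
        rfl, fun i j => by unfold pvB0; exact PySem.Set.nodup_ofList _⟩
    obtain ⟨hrel2, hinb2, hshape2⟩ := pv_iter2 grid hn hm
      (PySem.Int.floordiv (max_steps - 1) 2).toNat _ _ hbase hbinb hbshape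
    have harith : 2 * (PySem.Int.floordiv (max_steps - 1) 2).toNat
        + (PySem.Int.mod (max_steps - 1) 2).toNat + 1 = max_steps.toNat := by
      rw [PySem.Int.floordiv_eq_ediv_of_pos (by norm_num : (0 : Int) < 2),
        PySem.Int.mod_eq_emod_of_pos (by norm_num : (0 : Int) < 2)]
      omega
    have hr01 : (PySem.Int.mod (max_steps - 1) 2).toNat = 0
        ∨ (PySem.Int.mod (max_steps - 1) 2).toNat = 1 := by
      have h1 := PySem.Int.mod_nonneg (max_steps - 1) (by norm_num : (0 : Int) < 2)
      have h2 := PySem.Int.mod_lt (max_steps - 1) (by norm_num : (0 : Int) < 2)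
      omega
    rcases hr01 with hr | hr
    · rw [hr]
      simp only [List.replicate, List.foldl_nil]
      obtain ⟨g, hOg, hgn⟩ := hshape2
      rw [hOg] at hrel2 ⊢
      have hTeq : (pvF grid)^[max_steps.toNat] (PySem.Set.add PySem.Set.empty (x, y, 0, 0))
          = (pvF grid)^[2 * (PySem.Int.floordiv (max_steps - 1) 2).toNat]
            (pvF grid (PySem.Set.add PySem.Set.empty (x, y, 0, 0))) := by
        rw [← Function.iterate_succ_apply]
        congr 1
        omega
      rw [hTeq]
      exact (key g _ hrel2 hgn (pv_nodup_iter grid _ _) hinb2).symm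
    · rw [hr]
      simp only [List.replicate, List.foldl_cons, List.foldl_nil]
      have hrel3 := pvRel_step1 grid _ _ hn hm hrel2 hinb2
      obtain ⟨g, hOg, hgn⟩ := pvShape_pvBstep (grid.length : Int)
        (PySem.Str.len (PySem.List.pyGetD grid 0 ""))
        (((List.replicate (PySem.Int.floordiv (max_steps - 1) 2).toNat
          ((PySem.List.pyRange 0 (grid.length : Int) 1).map (fun i =>
            (PySem.List.pyRange 0 (PySem.Str.len (PySem.List.pyGetD grid 0 "")) 1).map (fun j =>
              pvInc2 grid (grid.length : Int)
                (PySem.Str.len (PySem.List.pyGetD grid 0 "")) i j)))).foldl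
            (pvBstep (grid.length : Int) (PySem.Str.len (PySem.List.pyGetD grid 0 "")))
            ((PySem.List.pyRange 0 (grid.length : Int) 1).map (fun i =>
              (PySem.List.pyRange 0 (PySem.Str.len (PySem.List.pyGetD grid 0 "")) 1).map (fun j =>
                pvB0 grid (grid.length : Int)
                  (PySem.Str.len (PySem.List.pyGetD grid 0 "")) x y i j)))))
        ((PySem.List.pyRange 0 (grid.length : Int) 1).map (fun i =>
          (PySem.List.pyRange 0 (PySem.Str.len (PySem.List.pyGetD grid 0 "")) 1).map (fun j =>
            pvInc1 grid (grid.length : Int) (PySem.Str.len (PySem.List.pyGetD grid 0 "")) i j)))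
      rw [hOg] at hrel3 ⊢
      have hTeq : (pvF grid)^[max_steps.toNat] (PySem.Set.add PySem.Set.empty (x, y, 0, 0))
          = pvF grid ((pvF grid)^[2 * (PySem.Int.floordiv (max_steps - 1) 2).toNat]
            (pvF grid (PySem.Set.add PySem.Set.empty (x, y, 0, 0)))) := by
        calc (pvF grid)^[max_steps.toNat] (PySem.Set.add PySem.Set.empty (x, y, 0, 0))
            = (pvF grid)^[2 * (PySem.Int.floordiv (max_steps - 1) 2).toNat + 1 + 1]
              (PySem.Set.add PySem.Set.empty (x, y, 0, 0)) := by
              rw [show max_steps.toNat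
                = 2 * (PySem.Int.floordiv (max_steps - 1) 2).toNat + 1 + 1 from by omega]
          _ = (pvF grid)^[2 * (PySem.Int.floordiv (max_steps - 1) 2).toNat + 1]
              (pvF grid (PySem.Set.add PySem.Set.empty (x, y, 0, 0))) :=
              Function.iterate_succ_apply _ _ _
          _ = pvF grid ((pvF grid)^[2 * (PySem.Int.floordiv (max_steps - 1) 2).toNat]
              (pvF grid (PySem.Set.add PySem.Set.empty (x, y, 0, 0)))) :=
              Function.iterate_succ_apply' _ _ _
      rw [hTeq]
      exact (key g _ hrel3 hgn (pv_nodup_pvF grid _)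
        (fun z hz => pv_bounds_pvF grid _ z hn hm hz)).symm

-- ===== VERDICT (by name: the statement is the Claim_ definition above) =====
theorem reachable_tiles_spec : Claim_equal_reachable_tiles := by
  intro grid x y max_steps _ hpre
  unfold Spec_reachable_tiles
  exact reachable_tiles_equalP grid x y max_steps hpre
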